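-- pv_equiv track=rewrite | github.com/JSREI/force-fuck-captcha-background | python-sdk/captcha_background_sdk/font_glyph_extractor.py | _build_bitmap_2d_from_bbox_pixels
-- ===== SOURCE A (Python) =====
-- from typing import Iterable, List, Optional, Tuple
--
-- def _build_bitmap_2d_from_bbox_pixels(
--     bbox: tuple[int, int, int, int],
--     pixels: List[tuple[int, int]],
-- ) -> List[List[int]]:
--     left, top, right, bottom = bbox
--     width = right - left + 1
--     height = bottom - top + 1
--     bitmap = [[0 for _ in range(width)] for _ in range(height)]
--     for x, y in pixels:
--         rx = x - left
--         ry = y - top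
--         if 0 <= rx < width and 0 <= ry < height:
--             bitmap[ry][rx] = 1
--     return bitmap
-- ===== SOURCE B (Python) =====
-- def _build_bitmap_2d_from_bbox_pixels(bbox, pixels):
--     left, top, right, bottom = bbox
--     width = right - left + 1
--     height = bottom - top + 1
--     pset = {(x - left, y - top) for (x, y) in pixels}
--     return [[1 if (rx, ry) in pset else 0 for rx in range(width)]
--             for ry in range(height)]
-- ===== Notes on version B (the rewrite author's own statement) =====
-- stated objective: idiomatic
-- what changed: Instead of allocating a zero grid and mutating cells while iterating over the pixel list, B builds a set of relative pixel coordinates once and materializes the grid with a nested comprehension that scans every cell and tests membership; out-of-bounds pixels are excluded by the scanned ranges rather than by a guard.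
import Mathlib
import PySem

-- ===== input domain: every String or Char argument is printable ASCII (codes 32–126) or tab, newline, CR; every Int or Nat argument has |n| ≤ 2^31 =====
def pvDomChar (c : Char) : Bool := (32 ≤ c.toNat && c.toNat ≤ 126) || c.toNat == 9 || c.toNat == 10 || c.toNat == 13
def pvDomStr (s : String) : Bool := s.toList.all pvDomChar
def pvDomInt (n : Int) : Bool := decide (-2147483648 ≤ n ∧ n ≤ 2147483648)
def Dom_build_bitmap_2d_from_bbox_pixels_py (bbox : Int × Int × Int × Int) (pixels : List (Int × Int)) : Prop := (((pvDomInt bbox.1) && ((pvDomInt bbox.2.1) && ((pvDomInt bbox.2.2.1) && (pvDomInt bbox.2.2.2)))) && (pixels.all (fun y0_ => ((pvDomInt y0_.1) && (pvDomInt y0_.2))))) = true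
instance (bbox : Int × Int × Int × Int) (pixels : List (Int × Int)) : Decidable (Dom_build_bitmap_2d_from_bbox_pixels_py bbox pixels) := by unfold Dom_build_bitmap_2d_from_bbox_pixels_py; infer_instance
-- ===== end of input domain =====

-- B replaces A's mutate-while-iterating-pixels loop by a set of relative coordinates
-- consulted while scanning every grid cell (idiomatic; same asymptotic cost).

-- ===== PORT A =====
-- one iteration of A's 'for x, y in pixels' loop: conditional in-place write bitmap[ry][rx] = 1
def pvStepA (left top width height : Int) (bm : List (List Int)) (p : Int × Int) : List (List Int) :=
  let rx := p.1 - left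
  let ry := p.2 - top
  if (0 ≤ rx ∧ rx < width) ∧ (0 ≤ ry ∧ ry < height) then
    PySem.List.pySetD bm ry (PySem.List.pySetD (PySem.List.pyGetD bm ry []) rx 1)
  else bm

def build_bitmap_2d_from_bbox_pixels_py (bbox : Int × Int × Int × Int) (pixels : List (Int × Int)) : List (List Int) :=
  let left := bbox.1
  let top := bbox.2.1
  let right := bbox.2.2.1
  let bottom := bbox.2.2.2
  let width := right - left + 1
  let height := bottom - top + 1
  let bitmap := (PySem.List.pyRange 0 height 1).map (fun _ => (PySem.List.pyRange 0 width 1).map (fun _ => (0 : Int)))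
  pixels.foldl (pvStepA left top width height) bitmap

-- ===== PORT B =====
def build_bitmap_2d_from_bbox_pixels_py_alt (bbox : Int × Int × Int × Int) (pixels : List (Int × Int)) : List (List Int) :=
  let left := bbox.1
  let top := bbox.2.1
  let right := bbox.2.2.1
  let bottom := bbox.2.2.2
  let width := right - left + 1
  let height := bottom - top + 1
  let pset : PySem.Set (Int × Int) := PySem.Set.ofList (pixels.map (fun p => (p.1 - left, p.2 - top)))
  (PySem.List.pyRange 0 height 1).map (fun ry =>
    (PySem.List.pyRange 0 width 1).map (fun rx =>
      if PySem.Set.contains pset (rx, ry) then (1 : Int) else 0))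

-- ===== PRECONDITION & SPEC =====
def Spec_build_bitmap_2d_from_bbox_pixels_py (bbox : Int × Int × Int × Int) (pixels : List (Int × Int)) (out : List (List Int)) : Prop := out = build_bitmap_2d_from_bbox_pixels_py_alt bbox pixels
instance (bbox : Int × Int × Int × Int) (pixels : List (Int × Int)) (out : List (List Int)) : Decidable (Spec_build_bitmap_2d_from_bbox_pixels_py bbox pixels out) := by unfold Spec_build_bitmap_2d_from_bbox_pixels_py; infer_instance

-- ===== CLAIM (what is proved, stated in full; the proofs are below) =====
def Claim_equal_build_bitmap_2d_from_bbox_pixels_py : Prop := ∀ (bbox : Int × Int × Int × Int) (pixels : List (Int × Int)), Dom_build_bitmap_2d_from_bbox_pixels_py bbox pixels → Spec_build_bitmap_2d_from_bbox_pixels_py bbox pixels (build_bitmap_2d_from_bbox_pixels_py bbox pixels)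

-- ===== LEMMAS AND PROOFS =====

-- one loop step preserves the number of rows
lemma pvStepA_length (left top w h : Int) (bm : List (List Int)) (p : Int × Int) :
    (pvStepA left top w h bm p).length = bm.length := by
  simp only [pvStepA]
  split_ifs with hc
  · simp [PySem.List.length_pySetD]
  · rfl

lemma pvFoldA_length (left top w h : Int) (ps : List (Int × Int)) (bm : List (List Int)) :
    (ps.foldl (pvStepA left top w h) bm).length = bm.length := by
  induction ps generalizing bm with
  | nil => rfl
  | cons p ps ih => rw [List.foldl_cons, ih, pvStepA_length]

-- one loop step preserves each row's length
lemma pvStepA_row_length (left top w h : Int) (bm : List (List Int)) (p : Int × Int) (j : Nat) :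
    ((pvStepA left top w h bm p).getD j []).length = (bm.getD j []).length := by
  simp only [pvStepA]
  split_ifs with hc
  · obtain ⟨⟨h1, h2⟩, h3, h4⟩ := hc
    rw [PySem.List.pySetD_of_nonneg _ _ h3]
    by_cases hj : (p.2 - top).toNat = j
    · subst hj
      by_cases hlt : (p.2 - top).toNat < bm.length
      · simp [List.getD_eq_getElem?_getD, List.getElem?_set_self hlt,
          PySem.List.pyGetD_of_nonneg _ _ h3, PySem.List.length_pySetD,
          List.getD_eq_getElem?_getD]
      · simp [List.getD_eq_getElem?_getD, hlt]
    · simp [List.getD_eq_getElem?_getD, List.getElem?_set_ne hj]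
  · rfl

-- a step whose pixel is NOT the cell (i, j) leaves that cell unchanged
lemma pvStepA_get_ne (left top w h : Int) (bm : List (List Int)) (p : Int × Int) (j i : Nat)
    (hne : ¬ (p.1 - left = (i : Int) ∧ p.2 - top = (j : Int))) :
    ((pvStepA left top w h bm p).getD j []).getD i 0 = (bm.getD j []).getD i 0 := by
  simp only [pvStepA]
  split_ifs with hc
  · obtain ⟨⟨h1, h2⟩, h3, h4⟩ := hc
    rw [PySem.List.pySetD_of_nonneg _ _ h3]
    by_cases hj : (p.2 - top).toNat = j
    · have hjy : p.2 - top = (j : Int) := by omega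
      have hx' : p.1 - left ≠ (i : Int) := fun hx => hne ⟨hx, hjy⟩
      have hix : (p.1 - left).toNat ≠ i := by omega
      rw [PySem.List.pyGetD_of_nonneg _ _ h3, PySem.List.pySetD_of_nonneg _ _ h1, hj]
      by_cases hlt : j < bm.length
      · simp [List.getD_eq_getElem?_getD, List.getElem?_set_self hlt, List.getElem?_set_ne hix]
      · simp [List.getD_eq_getElem?_getD, hlt]
    · simp [List.getD_eq_getElem?_getD, List.getElem?_set_ne hj]
  · rfl

-- a step whose pixel IS the in-bounds cell (i, j) writes a 1 there
lemma pvStepA_get_eq (left top w h : Int) (bm : List (List Int)) (p : Int × Int) (j i : Nat)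
    (hlen : bm.length = h.toNat)
    (hrow : (bm.getD j []).length = w.toNat)
    (hj : j < h.toNat) (hi : i < w.toNat)
    (heq : p.1 - left = (i : Int) ∧ p.2 - top = (j : Int)) :
    ((pvStepA left top w h bm p).getD j []).getD i 0 = 1 := by
  obtain ⟨hx, hy⟩ := heq
  simp only [pvStepA]
  rw [if_pos (by constructor <;> constructor <;> omega)]
  rw [hx, hy]
  have hjlen : j < bm.length := by omega
  rw [PySem.List.pySetD_natCast, PySem.List.pySetD_natCast, PySem.List.pyGetD_natCast]
  have hil : i < (bm[j]?.getD []).length := by rw [← List.getD_eq_getElem?_getD]; omega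
  simp [List.getD_eq_getElem?_getD, List.getElem?_set_self hjlen, List.getElem?_set_self hil]

-- row lengths after folding the whole pixel list
lemma pvFoldA_row_length (left top w h : Int) (ps : List (Int × Int)) (bm : List (List Int)) (j : Nat) :
    ((ps.foldl (pvStepA left top w h) bm).getD j []).length = (bm.getD j []).length := by
  induction ps generalizing bm with
  | nil => rfl
  | cons p ps ih => rw [List.foldl_cons, ih, pvStepA_row_length]

-- the loop invariant: the cell (j, i) after folding the whole pixel list
lemma pvFoldA_get (left top w h : Int) (ps : List (Int × Int)) (bm : List (List Int))
    (hlen : bm.length = h.toNat)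
    (hrow : ∀ k : Nat, k < bm.length → (bm.getD k []).length = w.toNat)
    (j i : Nat) (hj : j < h.toNat) (hi : i < w.toNat) :
    ((ps.foldl (pvStepA left top w h) bm).getD j []).getD i 0 =
      if ∃ p ∈ ps, p.1 - left = (i : Int) ∧ p.2 - top = (j : Int) then 1
      else (bm.getD j []).getD i 0 := by
  induction ps generalizing bm with
  | nil => simp
  | cons p ps ih =>
    rw [List.foldl_cons,
      ih (pvStepA left top w h bm p)
        (by rw [pvStepA_length]; exact hlen)
        (by intro k hk
            rw [pvStepA_row_length]
            exact hrow k (by rwa [pvStepA_length] at hk))]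
    by_cases hex : ∃ q ∈ ps, q.1 - left = (i : Int) ∧ q.2 - top = (j : Int)
    · obtain ⟨q, hq, hq2⟩ := hex
      rw [if_pos ⟨q, hq, hq2⟩, if_pos ⟨q, List.mem_cons_of_mem _ hq, hq2⟩]
    · rw [if_neg hex]
      by_cases hp : p.1 - left = (i : Int) ∧ p.2 - top = (j : Int)
      · rw [if_pos ⟨p, List.mem_cons_self, hp⟩]
        exact pvStepA_get_eq left top w h bm p j i hlen (hrow j (by omega)) hj hi hp
      · rw [if_neg (by rintro ⟨q, hq, hq2⟩
                       rcases List.mem_cons.mp hq with rfl | hmem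
                       · exact hp hq2
                       · exact hex ⟨q, hmem, hq2⟩),
          pvStepA_get_ne left top w h bm p j i hp]

-- the whole equivalence, with the bbox components as plain variables
lemma pvMain (left top right bottom : Int) (pixels : List (Int × Int)) :
    pixels.foldl (pvStepA left top (right - left + 1) (bottom - top + 1))
      ((PySem.List.pyRange 0 (bottom - top + 1) 1).map
        (fun _ => (PySem.List.pyRange 0 (right - left + 1) 1).map (fun _ => (0 : Int)))) =
    (PySem.List.pyRange 0 (bottom - top + 1) 1).map (fun ry =>
      (PySem.List.pyRange 0 (right - left + 1) 1).map (fun rx =>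
        if PySem.Set.contains (PySem.Set.ofList (pixels.map (fun p => (p.1 - left, p.2 - top)))) (rx, ry)
        then (1 : Int) else 0)) := by
  set W := right - left + 1 with hW
  set H := bottom - top + 1 with hH
  set init : List (List Int) :=
    (PySem.List.pyRange 0 H 1).map (fun _ => (PySem.List.pyRange 0 W 1).map (fun _ => (0 : Int))) with hinit
  have hinitlen : init.length = H.toNat := by
    simp [hinit, PySem.List.length_pyRange_one]
  have hinitrow : ∀ k : Nat, k < init.length → init.getD k [] = (PySem.List.pyRange 0 W 1).map (fun _ => (0 : Int)) := by
    intro k hk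
    rw [List.getD_eq_getElem _ _ hk]
    simp [hinit]
  apply List.ext_getElem
  · simp [pvFoldA_length, hinitlen, PySem.List.length_pyRange_one]
  · intro j hj1 hj2
    have hjH : j < H.toNat := by
      rw [pvFoldA_length, hinitlen] at hj1; exact hj1
    apply List.ext_getElem
    · rw [← List.getD_eq_getElem _ ([] : List Int) hj1, pvFoldA_row_length,
        hinitrow j (by omega)]
      simp [PySem.List.length_pyRange_one, PySem.List.getElem_pyRange_one]
    · intro i hi1 hi2
      have hiW : i < W.toNat := by
        rw [← List.getD_eq_getElem _ ([] : List Int) hj1, pvFoldA_row_length,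
          hinitrow j (by omega)] at hi1
        simpa [PySem.List.length_pyRange_one] using hi1
      rw [← List.getD_eq_getElem _ (0 : Int) hi1,
        ← List.getD_eq_getElem _ ([] : List Int) hj1,
        pvFoldA_get left top W H pixels init hinitlen
          (by intro k hk; rw [hinitrow k hk]; simp [PySem.List.length_pyRange_one])
          j i hjH hiW]
      have hrhs : ((PySem.List.pyRange 0 H 1).map (fun ry =>
          (PySem.List.pyRange 0 W 1).map (fun rx =>
            if PySem.Set.contains (PySem.Set.ofList (pixels.map (fun p => (p.1 - left, p.2 - top)))) (rx, ry)
            then (1 : Int) else 0)))[j]'hj2 =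
          (PySem.List.pyRange 0 W 1).map (fun rx =>
            if PySem.Set.contains (PySem.Set.ofList (pixels.map (fun p => (p.1 - left, p.2 - top)))) (rx, (0 : Int) + (j : Int))
            then (1 : Int) else 0) := by
        simp [PySem.List.getElem_pyRange_one]
        intro a _ _
        rw [PySem.List.getElem_pyRange_one]
      simp only [hrhs]
      rw [List.getElem_map, PySem.List.getElem_pyRange_one (h := by simpa [PySem.List.length_pyRange_one] using hiW)]
      rw [hinitrow j (by omega)]
      have hzero : (((PySem.List.pyRange 0 W 1).map (fun _ => (0 : Int))).getD i 0) = 0 := by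
        simp [List.getD_eq_getElem?_getD]
      rw [hzero]
      have hcond : (PySem.Set.contains (PySem.Set.ofList (pixels.map (fun p => (p.1 - left, p.2 - top)))) ((0 : Int) + (i : Int), (0 : Int) + (j : Int)) = true) ↔
          (∃ p ∈ pixels, p.1 - left = (i : Int) ∧ p.2 - top = (j : Int)) := by
        rw [PySem.Set.contains_iff, PySem.Set.mem_ofList, List.mem_map]
        simp only [Prod.ext_iff]
        constructor <;> rintro ⟨p, hp, h1, h2⟩ <;> exact ⟨p, hp, by omega, by omega⟩
      by_cases hc : ∃ p ∈ pixels, p.1 - left = (i : Int) ∧ p.2 - top = (j : Int)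
      · rw [if_pos hc, if_pos (hcond.mpr hc)]
      · rw [if_neg hc, if_neg (fun hh => hc (hcond.mp hh))]

-- ===== VERDICT (by name: the statement is the Claim_ definition above) =====
theorem build_bitmap_2d_from_bbox_pixels_py_spec : Claim_equal_build_bitmap_2d_from_bbox_pixels_py := by
  intro bbox pixels _hdom
  unfold Spec_build_bitmap_2d_from_bbox_pixels_py
  simp only [build_bitmap_2d_from_bbox_pixels_py, build_bitmap_2d_from_bbox_pixels_py_alt]
  exact pvMain bbox.1 bbox.2.1 bbox.2.2.1 bbox.2.2.2 pixels
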